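-- pv_equiv track=rewrite | github.com/dharana77/algorithm-programmers-by-Python-Java-SQL | 백준/Silver/3085. 사탕 게임/사탕 게임.py | count
-- ===== SOURCE A (Python) =====
-- def count(arr):
--   n=len(arr)
--   answer=1
--
--   for i in range(n):
--     # 가로줄 순회, 연속되는 수 세기
--     cnt=1
--     for j in range(1,n):
--     # 이전과 같다면 +1
--       if arr[i][j]==arr[i][j-1]:
--         cnt+=1
--      #다르면 다시 1로 초기화
--       else:
--         cnt=1
-- 	#현재 cnt가 더 크면 갱신
--       if cnt>answer:
--         answer=cnt
--
--     #세로줄 순회, 연속 되는 수 세기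
--     cnt=1
--     for j in range(1,n):
--       if arr[j][i]==arr[j-1][i]:
--         cnt+=1
--       else:
--         cnt=1
--       if cnt>answer:
--         answer=cnt
--
--   return answer
-- ===== SOURCE B (Python) =====
-- def _best_run(line, best):
--     n = len(line)
--     cuts = [0] + [k for k in range(1, n) if line[k] != line[k - 1]] + [n]
--     diffs = [cuts[k + 1] - cuts[k] for k in range(len(cuts) - 1)]
--     return max(best, max(diffs))
--
-- def count(arr):
--     n = len(arr)
--     lines = [arr[i][:n] for i in range(n)]
--     lines += [[arr[j][i] for j in range(n)] for i in range(n)]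
--     best = 1
--     for line in lines:
--         best = _best_run(line, best)
--     return best
-- ===== Notes on version B (the rewrite author's own statement) =====
-- stated objective: alternative
-- what changed: B replaces A's interleaved incremental run counter (mutable cnt/answer per index) by building each row/column as a list, computing its run-boundary positions ('cuts') with a comprehension, and taking the max of adjacent cut differences.
-- outside the precondition, e.g. on count([[]]): A returns 1, B raises IndexError
import Mathlib
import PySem

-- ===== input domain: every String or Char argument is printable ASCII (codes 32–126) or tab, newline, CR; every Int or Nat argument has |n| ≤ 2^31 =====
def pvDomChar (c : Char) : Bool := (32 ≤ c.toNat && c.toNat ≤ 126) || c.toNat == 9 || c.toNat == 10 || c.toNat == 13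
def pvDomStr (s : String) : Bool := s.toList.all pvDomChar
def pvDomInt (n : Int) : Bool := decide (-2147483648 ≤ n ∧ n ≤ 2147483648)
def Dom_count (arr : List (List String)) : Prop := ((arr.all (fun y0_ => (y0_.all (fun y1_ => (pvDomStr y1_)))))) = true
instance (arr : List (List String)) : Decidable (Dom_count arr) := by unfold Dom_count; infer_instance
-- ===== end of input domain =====

-- B replaces A's interleaved incremental run counter by per-line run-boundary ("cuts") lists
-- and max of adjacent cut differences; an alternative decomposition of the same O(n^2) task.

-- ===== PORT A =====
-- shared indexing helper: arr[i][j] for nonnegative in-range indices (exact under Pre_count)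
def pvGet (arr : List (List String)) (i j : Nat) : String :=
  (arr.getD i []).getD j ""

def count (arr : List (List String)) : Int :=
  let n := arr.length
  (List.range n).foldl (fun answer i =>
    let st1 := (List.range' 1 (n-1)).foldl
      (fun (st : Int × Int) j =>
        let cnt := if pvGet arr i j == pvGet arr i (j-1) then st.1 + 1 else 1
        (cnt, if cnt > st.2 then cnt else st.2)) (1, answer)
    let st2 := (List.range' 1 (n-1)).foldl
      (fun (st : Int × Int) j =>
        let cnt := if pvGet arr j i == pvGet arr (j-1) i then st.1 + 1 else 1
        (cnt, if cnt > st.2 then cnt else st.2)) (1, st1.2)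
    st2.2) 1

-- ===== PORT B =====
-- adjacent differences cuts[k+1]-cuts[k]
def pvDiffs : List Int → List Int
  | a :: b :: rest => (b - a) :: pvDiffs (b :: rest)
  | _ => []

-- Python max over a list (nonempty wherever B calls it; [] yields 0, unreachable)
def pvPyMax : List Int → Int
  | [] => 0
  | x :: rest => rest.foldl max x

def bestRun (line : List String) (best : Int) : Int :=
  let n := line.length
  let cuts : List Int :=
    0 :: ((List.range' 1 (n-1)).filter
        (fun k => !(line.getD k "" == line.getD (k-1) ""))).map Int.ofNat
      ++ [Int.ofNat n]
  max best (pvPyMax (pvDiffs cuts))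

def count_alt (arr : List (List String)) : Int :=
  let n := arr.length
  let lines :=
    (List.range n).map (fun i => (arr.getD i []).take n)
      ++ (List.range n).map (fun i => (List.range n).map (fun j => pvGet arr j i))
  lines.foldl (fun best line => bestRun line best) 1

-- ===== PRECONDITION & SPEC =====
-- Pre_ requires every row to have at least len(arr) entries (a square/rectangular board).
-- On ragged boards A raises IndexError, except a one-row board whose single row is empty,
-- where A returns 1 only because with n=1 its loops never index anything, while B's
-- column construction raises there (see the cite in claim.json).
def Pre_count (arr : List (List String)) : Prop :=
  ∀ row ∈ arr, arr.length ≤ row.length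
instance (arr : List (List String)) : Decidable (Pre_count arr) := by unfold Pre_count; infer_instance

def pvWitness_count : List (List String) := [["a", "b"], ["b", "b"]]

def Spec_count (arr : List (List String)) (out : Int) : Prop := out = count_alt arr
instance (arr : List (List String)) (out : Int) : Decidable (Spec_count arr out) := by unfold Spec_count; infer_instance

-- ===== CLAIM (what is proved, stated in full; the proofs are below) =====
def Claim_equal_count : Prop := ∀ (arr : List (List String)), Dom_count arr → Pre_count arr → Spec_count arr (count arr)

-- ===== LEMMAS AND PROOFS =====

-- run length of the maximal equal run ending at position m-1 of the line f (prefix length m ≥ 1)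
def runlen (f : Nat → String) : Nat → Int
  | 0 => 1
  | 1 => 1
  | n+2 => if f (n+1) == f n then runlen f (n+1) + 1 else 1

-- maximal run length in the first m entries of f (m ≥ 1)
def Mx (f : Nat → String) : Nat → Int
  | 0 => 1
  | 1 => 1
  | n+2 => max (Mx f (n+1)) (runlen f (n+2))

-- position of the last run boundary strictly before m
def lb (f : Nat → String) : Nat → Nat
  | 0 => 0
  | 1 => 0
  | n+2 => if f (n+1) == f n then lb f (n+1) else n+1

-- the break positions of the first n entries of f
def bk (f : Nat → String) (n : Nat) : List Nat :=
  (List.range' 1 (n-1)).filter (fun k => !(f k == f (k-1)))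

theorem if_gt_eq_max (x y : Int) : (if y > x then y else x) = max x y := by
  rw [max_def]; split_ifs <;> omega

theorem bk_succ (f : Nat → String) (n : Nat) (h : 1 ≤ n) :
    bk f (n+1) = bk f n ++ (if f n == f (n-1) then [] else [n]) := by
  unfold bk
  have h2 : n + 1 - 1 = (n - 1) + 1 := by omega
  rw [h2, List.range'_concat, List.filter_append]
  have h3 : 1 + 1 * (n - 1) = n := by omega
  rw [h3]
  simp only [List.filter]
  cases hb : (f n == f (n-1)) <;> simp

theorem pvDiffs_concat (xs : List Int) (h : xs ≠ []) (m : Int) :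
    pvDiffs (xs ++ [m]) = pvDiffs xs ++ [m - xs.getLastD 0] := by
  induction xs with
  | nil => simp at h
  | cons a t ih =>
    cases t with
    | nil => simp [pvDiffs]
    | cons b t' =>
      have := ih (by simp)
      simp only [List.cons_append, pvDiffs] at this ⊢
      rw [this]
      simp [List.getLastD]

theorem getLast_cuts (f : Nat → String) (n : Nat) (h : 1 ≤ n) :
    (((0:Int) :: (bk f n).map Int.ofNat)).getLastD 0 = (lb f n : Int) := by
  induction n with
  | zero => omega
  | succ n ih =>
    rcases Nat.eq_or_lt_of_le h with h1 | h1
    · have : n = 0 := by omega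
      subst this
      simp [bk, lb]
    · have hn : 1 ≤ n := by omega
      cases heq : (f n == f (n-1)) with
      | true =>
        have hbk : bk f (n+1) = bk f n := by rw [bk_succ f n hn, heq]; simp
        have hlb : lb f (n+1) = lb f n := by
          cases n with
          | zero => omega
          | succ k =>
            simp only [Nat.add_sub_cancel] at heq
            simp [lb, heq]
        rw [hbk, hlb]
        exact ih hn
      | false =>
        have hbk : bk f (n+1) = bk f n ++ [n] := by rw [bk_succ f n hn, heq]; simp
        have hlb : lb f (n+1) = n := by
          cases n with
          | zero => omega
          | succ k =>
            simp only [Nat.add_sub_cancel] at heq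
            simp [lb, heq]
        rw [hbk, hlb]
        rw [show ((0:Int) :: (bk f n ++ [n]).map Int.ofNat)
            = (((0:Int) :: (bk f n).map Int.ofNat) ++ [Int.ofNat n]) by simp]
        rw [List.getLastD_concat]
        simp

theorem runlen_eq (f : Nat → String) (n : Nat) (h : 1 ≤ n) :
    runlen f n = (n : Int) - (lb f n : Int) := by
  induction n with
  | zero => omega
  | succ n ih =>
    rcases Nat.eq_or_lt_of_le h with h1 | h1
    · have : n = 0 := by omega
      subst this; simp [runlen, lb]
    · have hn : 1 ≤ n := by omega
      cases n with
      | zero => omega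
      | succ k =>
        simp only [runlen, lb]
        cases heq : (f (k+1) == f k) with
        | true => rw [if_pos rfl, if_pos rfl, ih hn]; push_cast; ring
        | false => simp

theorem pyMax_concat (xs : List Int) (hne : xs ≠ []) (v : Int) :
    pvPyMax (xs ++ [v]) = max (pvPyMax xs) v := by
  cases xs with
  | nil => simp at hne
  | cons x t => simp [pvPyMax, List.foldl_append]

-- the diffs of the full cuts list split into interior diffs plus the final run length
theorem cuts_diffs (f : Nat → String) (n : Nat) (hn : 1 ≤ n) :
    pvDiffs ((0:Int) :: (bk f n).map Int.ofNat ++ [Int.ofNat n])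
    = pvDiffs ((0:Int) :: (bk f n).map Int.ofNat) ++ [runlen f n] := by
  rw [show ((0:Int) :: (bk f n).map Int.ofNat ++ [Int.ofNat n])
      = (((0:Int) :: (bk f n).map Int.ofNat) ++ [Int.ofNat n]) from rfl]
  rw [pvDiffs_concat _ (by simp), getLast_cuts f n hn, runlen_eq f n hn]
  simp [Int.ofNat_eq_natCast]

-- B's per-line cuts/diffs/max computation yields the maximal run length
theorem B_line (f : Nat → String) (n : Nat) (h : 1 ≤ n) :
    pvPyMax (pvDiffs ((0:Int) :: (bk f n).map Int.ofNat ++ [Int.ofNat n])) = Mx f n := by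
  induction n with
  | zero => omega
  | succ n ih =>
    rcases Nat.eq_or_lt_of_le h with h1 | h1
    · have : n = 0 := by omega
      subst this
      simp [bk, pvDiffs, pvPyMax, Mx]
    · have hn : 1 ≤ n := by omega
      have hMx : Mx f (n+1) = max (Mx f n) (runlen f (n+1)) := by
        cases n with
        | zero => omega
        | succ k => simp [Mx]
      rw [cuts_diffs f (n+1) (by omega), hMx]
      have ihx := ih hn
      rw [cuts_diffs f n hn] at ihx
      cases heq : (f n == f (n-1)) with
      | true =>
        have hbk : bk f (n+1) = bk f n := by rw [bk_succ f n hn, heq]; simp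
        have hrl : runlen f (n+1) = runlen f n + 1 := by
          cases n with
          | zero => omega
          | succ k =>
            simp only [Nat.add_sub_cancel] at heq
            simp [runlen, heq]
        rw [hbk, hrl]
        cases hds : pvDiffs ((0:Int) :: (bk f n).map Int.ofNat) with
        | nil =>
          rw [hds] at ihx
          simp only [List.nil_append, pvPyMax, List.foldl_nil] at ihx ⊢
          rw [← ihx, max_eq_right (by omega : runlen f n ≤ runlen f n + 1)]
        | cons d ds' =>
          rw [show (d :: ds' ++ [runlen f n + 1]) = ((d :: ds') ++ [runlen f n + 1]) from rfl,
            pyMax_concat (d :: ds') (by simp) (runlen f n + 1)]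
          rw [hds] at ihx
          rw [pyMax_concat (d :: ds') (by simp) (runlen f n)] at ihx
          rw [← ihx, max_assoc,
            max_eq_right (by omega : runlen f n ≤ runlen f n + 1)]
      | false =>
        have hbk : bk f (n+1) = bk f n ++ [n] := by rw [bk_succ f n hn, heq]; simp
        have hrl : runlen f (n+1) = 1 := by
          cases n with
          | zero => omega
          | succ k =>
            simp only [Nat.add_sub_cancel] at heq
            simp [runlen, heq]
        rw [hbk, hrl]
        rw [show ((0:Int) :: (bk f n ++ [n]).map Int.ofNat)
            = ((0:Int) :: (bk f n).map Int.ofNat ++ [Int.ofNat n]) by simp]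
        rw [cuts_diffs f n hn]
        rw [pyMax_concat _ (by simp) _, ihx]

-- A's inner loop over one line computes (final run length, answer ⊔ max run)
theorem A_line (f : Nat → String) (n : Nat) (a : Int) (ha : 1 ≤ a) (h : 1 ≤ n) :
    (List.range' 1 (n-1)).foldl
      (fun (st : Int × Int) j =>
        let cnt := if f j == f (j-1) then st.1 + 1 else (1:Int)
        (cnt, if cnt > st.2 then cnt else st.2)) (1, a)
    = (runlen f n, max a (Mx f n)) := by
  induction n with
  | zero => omega
  | succ n ih =>
    rcases Nat.eq_or_lt_of_le h with h1 | h1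
    · have : n = 0 := by omega
      subst this
      simp [runlen, Mx, max_eq_left ha]
    · have hn : 1 ≤ n := by omega
      have hr : (n + 1 - 1) = (n - 1) + 1 := by omega
      rw [hr, List.range'_concat, List.foldl_append, ih hn]
      have h1n : 1 + 1 * (n - 1) = n := by omega
      rw [h1n]
      simp only [List.foldl]
      have hrl : (if f n == f (n-1) then runlen f n + 1 else (1:Int)) = runlen f (n+1) := by
        cases n with
        | zero => omega
        | succ k => simp [runlen]
      have hMx : Mx f (n+1) = max (Mx f n) (runlen f (n+1)) := by
        cases n with
        | zero => omega
        | succ k => simp [Mx]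
      rw [hrl, if_gt_eq_max, hMx, max_assoc]

-- the two line values for board arr
def Rv (arr : List (List String)) (i : Nat) : Int := Mx (fun j => pvGet arr i j) arr.length
def Cv (arr : List (List String)) (i : Nat) : Int := Mx (fun j => pvGet arr j i) arr.length

-- A's outer fold in closed form
theorem count_fold (arr : List (List String)) (hn : 1 ≤ arr.length) :
    ∀ (l : List Nat) (a : Int), 1 ≤ a →
    l.foldl (fun answer i =>
      let st1 := (List.range' 1 (arr.length-1)).foldl
        (fun (st : Int × Int) j =>
          let cnt := if pvGet arr i j == pvGet arr i (j-1) then st.1 + 1 else (1:Int)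
          (cnt, if cnt > st.2 then cnt else st.2)) (1, answer)
      let st2 := (List.range' 1 (arr.length-1)).foldl
        (fun (st : Int × Int) j =>
          let cnt := if pvGet arr j i == pvGet arr (j-1) i then st.1 + 1 else (1:Int)
          (cnt, if cnt > st.2 then cnt else st.2)) (1, st1.2)
      st2.2) a
    = l.foldl (fun a i => max (max a (Rv arr i)) (Cv arr i)) a := by
  intro l
  induction l with
  | nil => intro a ha; rfl
  | cons x t ih =>
    intro a ha
    simp only [List.foldl]
    rw [A_line (fun j => pvGet arr x j) arr.length a ha hn]
    simp only
    rw [A_line (fun j => pvGet arr j x) arr.length (max a (Mx (fun j => pvGet arr x j) arr.length)) (le_trans ha (le_max_left _ _)) hn]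
    simp only
    rw [ih _ (le_trans (le_trans ha (le_max_left _ _)) (le_max_left _ _))]
    simp only [Rv, Cv]

-- B's bestRun on a concrete line equals max best (Mx f n)
theorem bestRun_eq (line : List String) (f : Nat → String) (n : Nat) (h : 1 ≤ n)
    (hlen : line.length = n) (hacc : ∀ k, k < n → line.getD k "" = f k) (best : Int) :
    bestRun line best = max best (Mx f n) := by
  unfold bestRun
  simp only [hlen]
  have hfil : (List.range' 1 (n-1)).filter (fun k => !(line.getD k "" == line.getD (k-1) ""))
      = bk f n := by
    unfold bk
    apply List.filter_congr
    intro k hk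
    have hk' := List.mem_range'.mp hk
    have h2 : k < n := by omega
    rw [hacc k h2, hacc (k-1) (by omega)]
  rw [hfil]
  rw [B_line f n h]

theorem getD_take (l : List String) (n k : Nat) (hk : k < n) :
    (l.take n).getD k "" = l.getD k "" := by
  simp only [List.getD_eq_getElem?_getD, List.getElem?_take]
  simp [hk]

theorem getD_map_range (g : Nat → String) (n k : Nat) (hk : k < n) :
    (((List.range n).map g).getD k "") = g k := by
  simp only [List.getD_eq_getElem?_getD]
  rw [List.getElem?_map]
  simp [hk]

-- interleaved values permute to rows-then-columns
theorem flatMap_perm {α : Type} (R C : Nat → α) (l : List Nat) :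
    (l.flatMap (fun i => [R i, C i])).Perm (l.map R ++ l.map C) := by
  induction l with
  | nil => simp
  | cons x t ih =>
    simp only [List.flatMap_cons, List.map_cons, List.cons_append]
    refine List.Perm.cons _ ?_
    exact (List.Perm.cons _ ih).trans List.perm_middle.symm

theorem foldl_max_pair (R C : Nat → Int) (l : List Nat) (a : Int) :
    l.foldl (fun a i => max (max a (R i)) (C i)) a
    = (l.flatMap (fun i => [R i, C i])).foldl max a := by
  induction l generalizing a with
  | nil => rfl
  | cons x t ih => simp only [List.foldl, List.flatMap_cons, List.foldl_append]; rw [ih]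

-- ===== VERDICT (by name: the statement is the Claim_ definition above) =====
theorem count_spec : Claim_equal_count := by
  intro arr _ hpre
  unfold Spec_count
  show count arr = count_alt arr
  unfold count count_alt
  simp only []
  cases hn : arr.length with
  | zero => simp [List.range_zero]
  | succ m =>
    have hn1 : 1 ≤ arr.length := by omega
    rw [← hn]
    rw [count_fold arr hn1 (List.range arr.length) 1 le_rfl]
    rw [foldl_max_pair (Rv arr) (Cv arr) (List.range arr.length)]
    rw [List.Perm.foldl_eq (flatMap_perm (Rv arr) (Cv arr) (List.range arr.length)) 1]
    rw [List.foldl_append, List.foldl_map, List.foldl_map]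
    have hrow : ∀ (a : Int), (List.range arr.length).foldl (fun best i => bestRun ((arr.getD i []).take arr.length) best) a
        = (List.range arr.length).foldl (fun a i => max a (Rv arr i)) a := by
      intro a
      apply PySem.List.foldl_congr_mem
      intro acc i hi
      have hi' : i < arr.length := List.mem_range.mp hi
      have hrowlen : arr.length ≤ (arr.getD i []).length := by
        apply hpre
        rw [List.getD_eq_getElem?_getD, List.getElem?_eq_getElem hi']
        exact List.getElem_mem _
      apply bestRun_eq _ (fun j => pvGet arr i j) arr.length hn1
      · simp only [List.length_take]; omega
      · intro k hk
        rw [getD_take _ _ _ hk]; rfl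
    have hcol : ∀ (a : Int), (List.range arr.length).foldl (fun best i => bestRun ((List.range arr.length).map (fun j => pvGet arr j i)) best) a
        = (List.range arr.length).foldl (fun a i => max a (Cv arr i)) a := by
      intro a
      apply PySem.List.foldl_congr_mem
      intro acc i hi
      apply bestRun_eq _ (fun j => pvGet arr j i) arr.length hn1
      · simp
      · intro k hk
        exact getD_map_range _ _ _ hk
    rw [List.foldl_append, List.foldl_map, List.foldl_map, hrow, hcol]
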